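-- pv_equiv track=rewrite | github.com/LittleHaku/procesos-estocasticos | examen_discrete/barabasi.py | G_order
-- ===== SOURCE A (Python) =====
-- def G_order(G):
--     n = len(G)
--
--     q = sorted([(k, len(G[k])) for k in range(n)], key=lambda x : -x[1])
--     dct = {}
--     for (i, v) in enumerate(q):
--         dct[v[0]] = i
--
--     res = n*[[]]
--     for (k, adj) in enumerate(G):
--         p = [dct[a] for a in adj]
--         res[dct[k]] = p
--     return res
-- ===== SOURCE B (Python) =====
-- def G_order(G):
--     n = len(G)
--     if n == 0:
--         return []
--     # bucket vertices by degree (counting sort replaces the comparison sort)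
--     buckets = {}
--     maxd = 0
--     for k, adj in enumerate(G):
--         d = len(adj)
--         buckets.setdefault(d, []).append(k)
--         if d > maxd:
--             maxd = d
--     # assign new labels: highest degree first, ties by ascending original index
--     dct = [0] * n
--     i = 0
--     for d in range(maxd, -1, -1):
--         for k in buckets.get(d, []):
--             dct[k] = i
--             i += 1
--     res = [[] for _ in range(n)]
--     for k, adj in enumerate(G):
--         res[dct[k]] = [dct[a] for a in adj]
--     return res
-- ===== Notes on version B (the rewrite author's own statement) =====
-- stated objective: faster
-- what changed: B replaces A's comparison sort of the (vertex, degree) pairs by a counting sort: vertices are grouped into degree buckets in one pass and consumed from highest degree down (ties by ascending index, matching the stable sort), and the old->new map is a plain array instead of a dict built from the sorted list.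
import Mathlib
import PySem

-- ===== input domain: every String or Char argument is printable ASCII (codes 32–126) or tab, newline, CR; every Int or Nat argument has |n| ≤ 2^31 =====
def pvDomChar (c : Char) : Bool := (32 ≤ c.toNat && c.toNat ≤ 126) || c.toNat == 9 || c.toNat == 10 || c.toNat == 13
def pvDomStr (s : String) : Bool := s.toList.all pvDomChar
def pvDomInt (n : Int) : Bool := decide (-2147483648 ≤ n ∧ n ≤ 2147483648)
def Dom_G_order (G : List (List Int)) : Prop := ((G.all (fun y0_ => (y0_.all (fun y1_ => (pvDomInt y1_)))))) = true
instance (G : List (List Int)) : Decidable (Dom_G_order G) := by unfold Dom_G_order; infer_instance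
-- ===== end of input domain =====

-- B replaces A's comparison sort of vertices by descending degree with a counting sort
-- (degree buckets consumed high-to-low); objective: faster (O(n+m) ranking vs O(n log n)).


-- ===== PORT A =====
def G_order (G : List (List Int)) : List (List Int) :=
  let n : Int := PySem.List.len G
  let q := PySem.List.sorted
      ((PySem.List.pyRange 0 n 1).map (fun k => (k, PySem.List.len (PySem.List.pyGetD G k []))))
      (fun x => -x.2) false
  let dct : PySem.Dict Int Int :=
    (PySem.List.enumerate q 0).foldl (fun d iv => d.insert iv.2.1 iv.1) PySem.Dict.empty
  let res : List (List Int) := PySem.List.pyRepeat [[]] n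
  (PySem.List.enumerate G 0).foldl
    (fun r ka =>
      let p := ka.2.map (fun a => dct.getD a 0)
      PySem.List.pySetD r (dct.getD ka.1 0) p)
    res

-- ===== PORT B =====
def G_order_alt (G : List (List Int)) : List (List Int) :=
  let n : Int := PySem.List.len G
  if n = 0 then []
  else
    -- bucket vertices by degree, tracking the maximal degree
    let bm : PySem.Dict Int (List Int) × Int :=
      (PySem.List.enumerate G 0).foldl
        (fun st ka =>
          let d := PySem.List.len ka.2
          (st.1.modify d [] (· ++ [ka.1]), if d > st.2 then d else st.2))
        (PySem.Dict.empty, 0)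
    -- assign new labels: highest degree first, ties by ascending original index
    let di : List Int × Int :=
      (PySem.List.pyRange bm.2 (-1) (-1)).foldl
        (fun st d =>
          (bm.1.getD d []).foldl (fun st k => (PySem.List.pySetD st.1 k st.2, st.2 + 1)) st)
        (PySem.List.pyRepeat [0] n, 0)
    let dct := di.1
    (PySem.List.enumerate G 0).foldl
      (fun r ka => PySem.List.pySetD r (PySem.List.pyGetD dct ka.1 0)
          (ka.2.map (fun a => PySem.List.pyGetD dct a 0)))
      ((PySem.List.pyRange 0 n 1).map (fun _ => []))

-- ===== PRECONDITION & SPEC =====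
-- Pre_ excludes exactly the inputs where A raises KeyError: an adjacency entry
-- that is not a vertex index 0 ≤ a < len(G).
def Pre_G_order (G : List (List Int)) : Prop :=
  ∀ adj ∈ G, ∀ a ∈ adj, 0 ≤ a ∧ a < (G.length : Int)
instance (G : List (List Int)) : Decidable (Pre_G_order G) := by unfold Pre_G_order; infer_instance
def pvWitness_G_order : List (List Int) := [[1, 2], [0], [0]]

def Spec_G_order (G : List (List Int)) (out : List (List Int)) : Prop := out = G_order_alt G
instance (G : List (List Int)) (out : List (List Int)) : Decidable (Spec_G_order G out) := by unfold Spec_G_order; infer_instance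

-- ===== CLAIM (what is proved, stated in full; the proofs are below) =====
def Claim_equal_G_order : Prop := ∀ (G : List (List Int)), Dom_G_order G → Pre_G_order G → Spec_G_order G (G_order G)

-- ===== LEMMAS AND PROOFS =====

-- proof-only abbreviations for the intermediate values of the two ports
def pvPairs (G : List (List Int)) : List (Int × Int) :=
  (PySem.List.pyRange 0 (PySem.List.len G) 1).map
    (fun k => (k, PySem.List.len (PySem.List.pyGetD G k [])))

def pvMaxd (G : List (List Int)) : Int :=
  (PySem.List.enumerate G 0).foldl
    (fun m ka => if PySem.List.len ka.2 > m then PySem.List.len ka.2 else m) 0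

def pvBuck (G : List (List Int)) : PySem.Dict Int (List Int) :=
  (PySem.List.enumerate G 0).foldl
    (fun dd ka => dd.modify (PySem.List.len ka.2) [] (· ++ [ka.1])) PySem.Dict.empty

def pvSeq (G : List (List Int)) : List Int :=
  (PySem.List.pyRange (pvMaxd G) (-1) (-1)).flatMap
    (fun d => ((pvPairs G).filter (fun x => x.2 == d)).map (·.1))

def pvDA (G : List (List Int)) : PySem.Dict Int Int :=
  (PySem.List.enumerate (PySem.List.sorted (pvPairs G) (fun x => -x.2) false) 0).foldl
    (fun d iv => d.insert iv.2.1 iv.1) PySem.Dict.empty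

def pvDB (G : List (List Int)) : List Int :=
  ((pvSeq G).foldl (fun st k => (PySem.List.pySetD st.1 k st.2, st.2 + 1))
    (PySem.List.pyRepeat [0] (PySem.List.len G), 0)).1

-- the order in which both the stable sort and the bucket pass list the degree pairs
def pvR (a b : Int × Int) : Prop := b.2 < a.2 ∨ (a.2 = b.2 ∧ a.1 ≤ b.1)

theorem pv_ins_pairwise (x : Int × Int) (acc : List (Int × Int))
    (hpw : acc.Pairwise pvR) (hlt : ∀ y ∈ acc, y.1 < x.1) :
    (PySem.List.insertBy (fun a b => decide (-a.2 < -b.2)) x acc).Pairwise pvR := by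
  induction acc with
  | nil => simp [PySem.List.insertBy]
  | cons y ys ih =>
    obtain ⟨hy, hys⟩ := List.pairwise_cons.mp hpw
    by_cases h : (-x.2 < -y.2)
    · rw [show PySem.List.insertBy (fun a b => decide (-a.2 < -b.2)) x (y :: ys)
            = x :: y :: ys from by simp [PySem.List.insertBy, h]]
      refine List.pairwise_cons.mpr ⟨?_, hpw⟩
      intro z hz
      rcases List.mem_cons.mp hz with rfl | hz
      · unfold pvR; omega
      · have := hy z hz; unfold pvR at this ⊢; omega
    · rw [show PySem.List.insertBy (fun a b => decide (-a.2 < -b.2)) x (y :: ys)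
            = y :: PySem.List.insertBy (fun a b => decide (-a.2 < -b.2)) x ys from by
          simp [PySem.List.insertBy, h]]
      refine List.pairwise_cons.mpr ⟨?_, ih hys (fun z hz => hlt z (List.mem_cons_of_mem _ hz))⟩
      intro z hz
      rcases (PySem.List.mem_insertBy _ _ _ _).mp hz with rfl | hz
      · have := hlt y (List.mem_cons_self ..)
        unfold pvR; omega
      · exact hy z hz

theorem pv_fold_sorted_pairwise (xs : List (Int × Int)) :
    ∀ acc : List (Int × Int), acc.Pairwise pvR →
    xs.Pairwise (fun a b => a.1 < b.1) →
    (∀ y ∈ acc, ∀ x ∈ xs, y.1 < x.1) →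
    (xs.foldl (fun acc x => PySem.List.insertBy (fun a b => decide (-a.2 < -b.2)) x acc) acc).Pairwise pvR := by
  induction xs with
  | nil => intro acc h _ _; simpa using h
  | cons x xs ih =>
    intro acc hacc hxs hcross
    obtain ⟨hx, hxs'⟩ := List.pairwise_cons.mp hxs
    rw [List.foldl_cons]
    refine ih _ (pv_ins_pairwise x acc hacc (fun y hy => hcross y hy x (List.mem_cons_self ..))) hxs' ?_
    intro y hy z hz
    rcases (PySem.List.mem_insertBy _ _ _ _).mp hy with rfl | hy
    · exact hx z hz
    · exact hcross y hy z (List.mem_cons_of_mem _ hz)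

theorem pv_sorted_pairwise (xs : List (Int × Int)) (h : xs.Pairwise (fun a b => a.1 < b.1)) :
    (PySem.List.sorted xs (fun x => -x.2) false).Pairwise pvR := by
  rw [PySem.List.sorted_eq_foldl_insertBy]
  exact pv_fold_sorted_pairwise xs [] (by simp) h (by simp)

theorem pv_partition_perm (ds : List Int) :
    ∀ xs : List (Int × Int), ds.Nodup → (∀ x ∈ xs, x.2 ∈ ds) →
    (ds.flatMap (fun d => xs.filter (fun x => x.2 == d))).Perm xs := by
  induction ds with
  | nil =>
    intro xs _ h
    rw [List.flatMap_nil]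
    cases xs with
    | nil => rfl
    | cons a l => exact absurd (h a (List.mem_cons_self ..)) (List.not_mem_nil)
  | cons d ds ih =>
    intro xs hnd h
    obtain ⟨hd, hnd'⟩ := List.pairwise_cons.mp hnd
    rw [List.flatMap_cons]
    have hrest : ds.flatMap (fun d' => xs.filter (fun x => x.2 == d'))
        = ds.flatMap (fun d' => (xs.filter (fun x => !(x.2 == d))).filter (fun x => x.2 == d')) := by
      rw [List.flatMap_def, List.flatMap_def]
      congr 1
      refine List.map_congr_left ?_
      intro d' hd'
      rw [List.filter_filter]
      refine (List.filter_congr ?_).symm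
      intro x _
      have hne : d ≠ d' := hd d' hd'
      by_cases hx2 : x.2 = d' <;> simp [hx2, Ne.symm hne]
    have hmem' : ∀ x ∈ xs.filter (fun x => !(x.2 == d)), x.2 ∈ ds := by
      intro x hx
      obtain ⟨hx1, hx2⟩ := List.mem_filter.mp hx
      rcases List.mem_cons.mp (h x hx1) with e | hin
      · simp [e] at hx2
      · exact hin
    have hperm := ih (xs.filter (fun x => !(x.2 == d))) hnd' hmem'
    rw [hrest]
    exact (hperm.append_left _).trans (List.filter_append_perm _ xs)

theorem pv_sort_eq (xs : List (Int × Int)) (m : Int)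
    (hpw : xs.Pairwise (fun a b => a.1 < b.1))
    (hdeg : ∀ x ∈ xs, 0 ≤ x.2 ∧ x.2 ≤ m) :
    PySem.List.sorted xs (fun x => -x.2) false
      = (PySem.List.pyRange m (-1) (-1)).flatMap (fun d => xs.filter (fun x => x.2 == d)) := by
  have hndds : (PySem.List.pyRange m (-1) (-1)).Nodup := by
    rw [PySem.List.pyRange_neg_one_eq_reverse]
    exact List.nodup_reverse.mpr (PySem.List.nodup_pyRange_one _ _)
  have hmemds : ∀ x ∈ xs, x.2 ∈ PySem.List.pyRange m (-1) (-1) := by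
    intro x hx
    have := hdeg x hx
    exact PySem.List.mem_pyRange_neg_one.mpr (by omega)
  refine List.Perm.eq_of_pairwise ?_ (pv_sorted_pairwise xs hpw) ?_ ?_
  · intro a b _ _ hab hba
    unfold pvR at hab hba
    have h2 : a.2 = b.2 := by omega
    have h1 : a.1 = b.1 := by omega
    exact Prod.ext h1 h2
  · rw [List.pairwise_flatMap]
    constructor
    · intro d _
      refine (hpw.filter _).imp_of_mem ?_
      intro a b ha hb hab
      have ha2 := (List.mem_filter.mp ha).2
      have hb2 := (List.mem_filter.mp hb).2
      simp only [beq_iff_eq] at ha2 hb2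
      exact Or.inr ⟨ha2.trans hb2.symm, le_of_lt hab⟩
    · have hpr : (PySem.List.pyRange m (-1) (-1)).Pairwise (fun a b => b < a) := by
        rw [PySem.List.pyRange_neg_one_eq_reverse, List.pairwise_reverse]
        exact PySem.List.pairwise_lt_pyRange_one _ _
      refine hpr.imp ?_
      intro d1 d2 h12 x hx y hy
      have hx2 := (List.mem_filter.mp hx).2
      have hy2 := (List.mem_filter.mp hy).2
      simp only [beq_iff_eq] at hx2 hy2
      exact Or.inl (by omega)
  · exact (PySem.List.sorted_perm xs _ _).trans (pv_partition_perm _ xs hndds hmemds).symm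

theorem pv_dictA (l : List (Int × Int)) :
    ∀ (s : Int) (d0 : PySem.Dict Int Int) (k : Int), (l.map (·.1)).Nodup →
    ((PySem.List.enumerate l s).foldl (fun d iv => d.insert iv.2.1 iv.1) d0).getD k 0
      = match PySem.List.index? (l.map (·.1)) k with
        | some p => s + (p : Int)
        | none => d0.getD k 0 := by
  induction l with
  | nil =>
    intro s d0 k _
    simp [PySem.List.enumerate_nil, PySem.List.index?]
  | cons x l ih =>
    intro s d0 k hnd
    rw [PySem.List.enumerate_cons, List.foldl_cons]
    simp only [List.map_cons] at hnd ⊢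
    obtain ⟨hx, hnd'⟩ := List.pairwise_cons.mp hnd
    rw [ih (s + 1) _ k hnd']
    by_cases hk : x.1 = k
    · subst hk
      have hnm : x.1 ∉ l.map (·.1) := fun hm => hx x.1 hm rfl
      rw [(PySem.List.index?_eq_none_iff _ _).mpr hnm, PySem.List.index?_cons_self]
      simp [PySem.Dict.getD_insert_self]
    · rw [PySem.List.index?_cons_of_ne _ hk]
      cases hidx : PySem.List.index? (l.map (·.1)) k with
      | some p => simp; ring
      | none => simp [PySem.Dict.getD_insert_of_ne _ _ _ (Ne.symm hk)]

theorem pv_dictB (seq : List Int) :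
    ∀ (dct0 : List Int) (i0 k : Int), seq.Nodup →
    (∀ x ∈ seq, 0 ≤ x ∧ x < (dct0.length : Int)) →
    0 ≤ k → k < (dct0.length : Int) →
    PySem.List.pyGetD (seq.foldl (fun st k => (PySem.List.pySetD st.1 k st.2, st.2 + 1)) (dct0, i0)).1 k 0
      = match PySem.List.index? seq k with
        | some p => i0 + (p : Int)
        | none => PySem.List.pyGetD dct0 k 0 := by
  induction seq with
  | nil => intro dct0 i0 k _ _ _ _; simp [PySem.List.index?]
  | cons k0 seq ih =>
    intro dct0 i0 k hnd hb hk0' hk1'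
    obtain ⟨hk0, hnd'⟩ := List.pairwise_cons.mp hnd
    have hb0 := hb k0 (List.mem_cons_self ..)
    rw [List.foldl_cons]
    have hlen : ((PySem.List.pySetD dct0 k0 i0).length : Int) = (dct0.length : Int) := by
      rw [PySem.List.length_pySetD]
    have hb' : ∀ x ∈ seq, 0 ≤ x ∧ x < ((PySem.List.pySetD dct0 k0 i0).length : Int) := by
      intro x hx; rw [hlen]; exact hb x (List.mem_cons_of_mem _ hx)
    rw [ih _ (i0 + 1) k hnd' hb' hk0' (by rw [hlen]; exact hk1')]
    have hset : PySem.List.pySetD dct0 k0 i0 = dct0.set k0.toNat i0 :=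
      PySem.List.pySetD_of_nonneg _ _ hb0.1
    by_cases hk : k0 = k
    · subst hk
      have hnm : k0 ∉ seq := fun hm => hk0 k0 hm rfl
      rw [(PySem.List.index?_eq_none_iff _ _).mpr hnm, PySem.List.index?_cons_self]
      simp only
      rw [hset, PySem.List.pyGetD_eq_getElem _ _ hb0.1 (by simpa using hk1')]
      rw [List.getElem_set_self]
      simp
    · rw [PySem.List.index?_cons_of_ne _ hk]
      cases hidx : PySem.List.index? seq k with
      | some p => simp; ring
      | none =>
        simp only
        rw [hset, PySem.List.pyGetD_eq_getElem _ _ hk0' (by simpa using hk1'),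
            PySem.List.pyGetD_eq_getElem _ _ hk0' hk1']
        exact List.getElem_set_ne (by omega) _

theorem pv_maxd_le (l : List (Int × List Int)) :
    ∀ m0 : Int,
      m0 ≤ l.foldl (fun m ka => if PySem.List.len ka.2 > m then PySem.List.len ka.2 else m) m0
      ∧ ∀ ka ∈ l, PySem.List.len ka.2
          ≤ l.foldl (fun m ka => if PySem.List.len ka.2 > m then PySem.List.len ka.2 else m) m0 := by
  induction l with
  | nil => intro m0; exact ⟨le_refl _, by simp⟩
  | cons x l ih =>
    intro m0
    rw [List.foldl_cons]
    obtain ⟨h1, h2⟩ := ih (if PySem.List.len x.2 > m0 then PySem.List.len x.2 else m0)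
    refine ⟨le_trans (by split_ifs <;> omega) h1, ?_⟩
    intro ka hka
    rcases List.mem_cons.mp hka with rfl | hka
    · exact le_trans (by split_ifs <;> omega) h1
    · exact h2 ka hka

theorem pv_buckets (l : List (Int × List Int)) :
    ∀ (d0 : PySem.Dict Int (List Int)) (c : Int),
    (l.foldl (fun dd ka => dd.modify (PySem.List.len ka.2) [] (· ++ [ka.1])) d0).getD c []
      = d0.getD c [] ++ (l.filter (fun ka => PySem.List.len ka.2 == c)).map (·.1) := by
  induction l with
  | nil => intro d0 c; simp
  | cons x l ih =>
    intro d0 c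
    rw [List.foldl_cons, ih, PySem.Dict.getD_modify, List.filter_cons]
    by_cases hc : c = PySem.List.len x.2
    · rw [if_pos hc, if_pos (by simp [hc]), hc]
      simp [List.append_assoc]
    · rw [if_neg hc, if_neg (by simpa using Ne.symm hc)]

theorem pv_hPE (G : List (List Int)) :
    pvPairs G = (PySem.List.enumerate G 0).map (fun ka => (ka.1, PySem.List.len ka.2)) := by
  rw [pvPairs, PySem.List.enumerate_eq_map_pyRange G [], List.map_map]
  rfl

theorem pv_hPfst (G : List (List Int)) :
    (pvPairs G).map (·.1) = PySem.List.pyRange 0 (PySem.List.len G) 1 := by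
  rw [pvPairs, List.map_map]
  rw [show ((fun x : Int × Int => x.1) ∘ fun k : Int => (k, PySem.List.len (PySem.List.pyGetD G k []))) = id from rfl, List.map_id]

theorem pv_hPpw (G : List (List Int)) :
    (pvPairs G).Pairwise (fun a b => a.1 < b.1) := by
  rw [pvPairs, List.pairwise_map]
  exact PySem.List.pairwise_lt_pyRange_one 0 (PySem.List.len G)

theorem pv_hdeg (G : List (List Int)) :
    ∀ x ∈ pvPairs G, 0 ≤ x.2 ∧ x.2 ≤ pvMaxd G := by
  intro x hx
  rw [pv_hPE] at hx
  obtain ⟨ka, hka, rfl⟩ := List.mem_map.mp hx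
  refine ⟨by simp [PySem.List.len_eq], ?_⟩
  rw [pvMaxd]
  exact (pv_maxd_le (PySem.List.enumerate G 0) 0).2 ka hka

theorem pv_hq (G : List (List Int)) :
    PySem.List.sorted (pvPairs G) (fun x => -x.2) false
      = (PySem.List.pyRange (pvMaxd G) (-1) (-1)).flatMap
          (fun d => (pvPairs G).filter (fun x => x.2 == d)) :=
  pv_sort_eq _ _ (pv_hPpw G) (pv_hdeg G)

theorem pv_hseq (G : List (List Int)) :
    (PySem.List.sorted (pvPairs G) (fun x => -x.2) false).map (·.1) = pvSeq G := by
  rw [pv_hq, List.map_flatMap, pvSeq]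

theorem pv_hseqperm (G : List (List Int)) :
    (pvSeq G).Perm (PySem.List.pyRange 0 (PySem.List.len G) 1) := by
  rw [← pv_hseq, ← pv_hPfst]
  exact (PySem.List.sorted_perm _ _ _).map _

theorem pv_hseqNd (G : List (List Int)) : (pvSeq G).Nodup :=
  (pv_hseqperm G).nodup_iff.mpr (PySem.List.nodup_pyRange_one _ _)

theorem pv_hseqmem (G : List (List Int)) (k : Int) :
    k ∈ pvSeq G ↔ 0 ≤ k ∧ k < PySem.List.len G :=
  (pv_hseqperm G).mem_iff.trans PySem.List.mem_pyRange_one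

theorem pv_buckG (G : List (List Int)) (d : Int) :
    (pvBuck G).getD d [] = ((pvPairs G).filter (fun x => x.2 == d)).map (·.1) := by
  rw [pvBuck, pv_buckets, PySem.Dict.getD_empty, List.nil_append]
  rw [pv_hPE, List.filter_map, List.map_map]
  rfl

theorem pv_look (G : List (List Int)) (k : Int) (h0 : 0 ≤ k) (h1 : k < (G.length : Int)) :
    (pvDA G).getD k 0 = PySem.List.pyGetD (pvDB G) k 0 := by
  have hnd : ((PySem.List.sorted (pvPairs G) (fun x => -x.2) false).map (·.1)).Nodup := by
    rw [pv_hseq]; exact pv_hseqNd G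
  have hlen0 : ((PySem.List.pyRepeat [(0:Int)] (PySem.List.len G)).length : Int) = (G.length : Int) := by
    rw [PySem.List.pyRepeat_singleton, List.length_replicate, PySem.List.len_eq, Int.toNat_natCast]
  rw [pvDA, pv_dictA _ 0 _ k hnd, pv_hseq]
  rw [pvDB, pv_dictB _ _ 0 k (pv_hseqNd G)
    (by intro x hx
        rw [hlen0]
        have := (pv_hseqmem G x).mp hx
        rw [PySem.List.len_eq] at this
        exact this)
    h0 (by rw [hlen0]; exact h1)]
  have hkmem : k ∈ pvSeq G := (pv_hseqmem G k).mpr (by rw [PySem.List.len_eq]; exact ⟨h0, h1⟩)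
  cases hidx : PySem.List.index? (pvSeq G) k with
  | some p => rfl
  | none => exact absurd hkmem ((PySem.List.index?_eq_none_iff _ _).mp hidx)

theorem pv_main (G : List (List Int)) (hpre : Pre_G_order G) :
    G_order G = G_order_alt G := by
  by_cases hG : G = []
  · subst hG; decide
  · have hn0 : (G.length : Int) ≠ 0 := by
      cases G with
      | nil => exact absurd rfl hG
      | cons a l => intro h; rw [List.length_cons] at h; omega
    have hA : G_order G =
        (PySem.List.enumerate G 0).foldl
          (fun r ka => PySem.List.pySetD r ((pvDA G).getD ka.1 0)
              (ka.2.map (fun a => (pvDA G).getD a 0)))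
          (PySem.List.pyRepeat [[]] (PySem.List.len G)) := rfl
    have hB0 : G_order_alt G =
        (if PySem.List.len G = 0 then [] else
          (PySem.List.enumerate G 0).foldl
            (fun r ka => PySem.List.pySetD r
                (PySem.List.pyGetD
                  (((PySem.List.pyRange
                      (((PySem.List.enumerate G 0).foldl
                        (fun st ka => (st.1.modify (PySem.List.len ka.2) [] (· ++ [ka.1]),
                          if PySem.List.len ka.2 > st.2 then PySem.List.len ka.2 else st.2))
                        (PySem.Dict.empty, 0)).2) (-1) (-1)).foldl
                      (fun st d =>
                        ((((PySem.List.enumerate G 0).foldl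
                          (fun st ka => (st.1.modify (PySem.List.len ka.2) [] (· ++ [ka.1]),
                            if PySem.List.len ka.2 > st.2 then PySem.List.len ka.2 else st.2))
                          (PySem.Dict.empty, 0)).1).getD d []).foldl
                          (fun st k => (PySem.List.pySetD st.1 k st.2, st.2 + 1)) st)
                      (PySem.List.pyRepeat [0] (PySem.List.len G), 0)).1)
                  ka.1 0)
                (ka.2.map (fun a => PySem.List.pyGetD
                  (((PySem.List.pyRange
                      (((PySem.List.enumerate G 0).foldl
                        (fun st ka => (st.1.modify (PySem.List.len ka.2) [] (· ++ [ka.1]),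
                          if PySem.List.len ka.2 > st.2 then PySem.List.len ka.2 else st.2))
                        (PySem.Dict.empty, 0)).2) (-1) (-1)).foldl
                      (fun st d =>
                        ((((PySem.List.enumerate G 0).foldl
                          (fun st ka => (st.1.modify (PySem.List.len ka.2) [] (· ++ [ka.1]),
                            if PySem.List.len ka.2 > st.2 then PySem.List.len ka.2 else st.2))
                          (PySem.Dict.empty, 0)).1).getD d []).foldl
                          (fun st k => (PySem.List.pySetD st.1 k st.2, st.2 + 1)) st)
                      (PySem.List.pyRepeat [0] (PySem.List.len G), 0)).1)
                  a 0)))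
            ((PySem.List.pyRange 0 (PySem.List.len G) 1).map (fun _ => []))) := rfl
    have hbm : (PySem.List.enumerate G 0).foldl
        (fun st ka => (st.1.modify (PySem.List.len ka.2) [] (· ++ [ka.1]),
          if PySem.List.len ka.2 > st.2 then PySem.List.len ka.2 else st.2))
        ((PySem.Dict.empty : PySem.Dict Int (List Int)), (0 : Int)) = (pvBuck G, pvMaxd G) :=
      PySem.List.foldl_prod_mk
        (fun (dd : PySem.Dict Int (List Int)) (ka : Int × List Int) =>
          dd.modify (PySem.List.len ka.2) [] (· ++ [ka.1]))
        (fun (m : Int) (ka : Int × List Int) =>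
          if PySem.List.len ka.2 > m then PySem.List.len ka.2 else m)
        (PySem.List.enumerate G 0) PySem.Dict.empty 0
    have hbm1 : _ = pvBuck G := congrArg Prod.fst hbm
    have hbm2 : _ = pvMaxd G := congrArg Prod.snd hbm
    have hdctB : ((PySem.List.pyRange (pvMaxd G) (-1) (-1)).foldl
        (fun st d => ((pvBuck G).getD d []).foldl
          (fun st k => (PySem.List.pySetD st.1 k st.2, st.2 + 1)) st)
        ((PySem.List.pyRepeat [(0 : Int)] (PySem.List.len G), (0 : Int)) : List Int × Int))
      = (pvSeq G).foldl (fun st k => (PySem.List.pySetD st.1 k st.2, st.2 + 1))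
          ((PySem.List.pyRepeat [(0 : Int)] (PySem.List.len G), (0 : Int)) : List Int × Int) := by
      have hflat : pvSeq G
          = ((PySem.List.pyRange (pvMaxd G) (-1) (-1)).map (fun d => (pvBuck G).getD d [])).flatten := by
        rw [pvSeq, List.flatMap_def]
        congr 1
        exact List.map_congr_left (fun d _ => (pv_buckG G d).symm)
      conv_rhs => rw [hflat, List.foldl_flatten, List.foldl_map]
    have hpvDB : ((pvSeq G).foldl (fun st k => (PySem.List.pySetD st.1 k st.2, st.2 + 1))
        ((PySem.List.pyRepeat [(0 : Int)] (PySem.List.len G), (0 : Int)) : List Int × Int)).1 = pvDB G := rfl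
    have hinit : (PySem.List.pyRepeat [([] : List Int)] (PySem.List.len G))
        = (PySem.List.pyRange 0 (PySem.List.len G) 1).map (fun _ => ([] : List Int)) := by
      rw [PySem.List.pyRepeat_singleton,
          show (fun _ : Int => ([] : List Int)) = Function.const Int ([] : List Int) from rfl,
          List.map_const, PySem.List.length_pyRange_one, PySem.List.len_eq]
      norm_num
    rw [hA, hB0, if_neg (by rw [PySem.List.len_eq]; exact hn0), hbm1, hbm2]
    rw [hdctB, hpvDB, hinit]
    apply PySem.List.foldl_congr_mem
    intro acc ka hka
    obtain ⟨k, hk, rfl⟩ := (PySem.List.mem_enumerate_iff G 0 ka).mp hka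
    have hb1 : (0 : Int) ≤ 0 + (k : Int) := by omega
    have hb2 : 0 + (k : Int) < (G.length : Int) := by exact_mod_cast (by omega : (0:Int) + k < G.length)
    have hadja : ∀ a ∈ G[k], 0 ≤ a ∧ a < (G.length : Int) :=
      hpre G[k] (List.getElem_mem hk)
    rw [pv_look G _ hb1 hb2]
    congr 1
    exact List.map_congr_left (fun a ha => pv_look G a (hadja a ha).1 (hadja a ha).2)

-- ===== VERDICT (by name: the statement is the Claim_ definition above) =====
theorem G_order_spec : Claim_equal_G_order := by
  intro G _ hpre
  unfold Spec_G_order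
  exact pv_main G hpre
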